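-- pv_equiv track=rewrite | github.com/HEOJUNFO/codingtest | 프로그래머스/3/77886. 110 옮기기/110 옮기기.py | solution
-- ===== SOURCE A (Python) =====
-- def solution(s):
--     answer = []
--     for x in s:
--         oneCount = 0
--         ooz = 0  # "110" 패턴의 개수
--         ones = []  # 결과 문자열을 담을 리스트 (나중에 ''.join() 할 예정)
--
--         for ch in x:
--             if ch == '1':
--                 oneCount += 1
--             else:
--                 # '0'을 만난 경우
--                 if oneCount >= 2:
--                     # 앞에 1이 2개 이상이면 "110" 패턴 하나 확보
--                     ooz += 1
--                     oneCount -= 2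
--                 else:
--                     # 앞에 1이 2개 미만이면 현재까지 모아둔 1들을 ones에 추가하고 0 추가
--                     if oneCount > 0:
--                         ones.extend(['1'] * oneCount)
--                     ones.append('0')
--                     oneCount = 0
--
--         # 남은 "110" 패턴들 삽입
--         for _ in range(ooz):
--             ones.extend(['1', '1', '0'])
--
--         # 남은 1들 삽입
--         if oneCount > 0:
--             ones.extend(['1'] * oneCount)
--
--         answer.append(''.join(ones))
--
--     return answer
-- ===== SOURCE B (Python) =====
-- def solution(s):
--     answer = []
--     for x in s:
--         # Phase 1: stack reduction — delete every "110" as it completes.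
--         cnt = 0
--         stack = []
--         for ch in x:
--             stack.append('1' if ch == '1' else '0')
--             if stack[-3:] == ['1', '1', '0']:
--                 del stack[-3:]
--                 cnt += 1
--         rem = ''.join(stack)
--         # Phase 2: reinsert all removed "110" blocks right after the last '0'.
--         i = len(rem) - 1
--         while i >= 0:
--             if rem[i] == '0':
--                 break
--             i -= 1
--         answer.append(rem[:i + 1] + '110' * cnt + rem[i + 1:])
--     return answer
-- ===== Notes on version B (the rewrite author's own statement) =====
-- stated objective: alternative
-- what changed: A carries a pending-ones counter and flushes/converts inside one pass; B instead does a two-phase computation: an explicit character stack that deletes each '110' as it completes, then a separate right-to-left scan for the last '0' and a single splice reinserting all '110' blocks there.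
import Mathlib
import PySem

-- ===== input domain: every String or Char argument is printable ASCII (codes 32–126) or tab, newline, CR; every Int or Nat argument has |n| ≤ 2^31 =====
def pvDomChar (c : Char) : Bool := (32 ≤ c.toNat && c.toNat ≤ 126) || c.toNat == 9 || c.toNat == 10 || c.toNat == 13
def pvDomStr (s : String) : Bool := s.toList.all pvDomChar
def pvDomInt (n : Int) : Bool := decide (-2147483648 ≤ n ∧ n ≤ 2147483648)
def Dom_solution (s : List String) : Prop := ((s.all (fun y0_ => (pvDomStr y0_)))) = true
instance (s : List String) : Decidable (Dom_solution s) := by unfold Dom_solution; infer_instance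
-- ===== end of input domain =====

-- B replaces A's pending-ones counter with a two-phase pass: an explicit '110'-deleting
-- character stack, then a right-to-left search for the last '0' and one splice (objective: alternative).

-- ===== PORT A =====
-- one step of A's inner loop; state = (oneCount, ooz, ones)
def aStep (st : Nat × Nat × List Char) (ch : Char) : Nat × Nat × List Char :=
  match st with
  | (oneCount, ooz, ones) =>
    if ch = '1' then (oneCount + 1, ooz, ones)
    else if 2 ≤ oneCount then (oneCount - 2, ooz + 1, ones)
    else (0, ooz, (if 0 < oneCount then ones ++ List.replicate oneCount '1' else ones) ++ ['0'])

def solution (s : List String) : List String :=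
  s.map (fun x =>
    match x.toList.foldl aStep (0, 0, []) with
    | (oneCount, ooz, ones) =>
      -- for _ in range(ooz): ones.extend(['1','1','0'])
      let ones2 := (List.range ooz).foldl (fun acc _ => acc ++ ['1', '1', '0']) ones
      -- if oneCount > 0: ones.extend(['1'] * oneCount)
      let ones3 := if 0 < oneCount then ones2 ++ List.replicate oneCount '1' else ones2
      String.mk ones3)   -- ''.join(ones)

-- ===== PORT B =====
-- one step of B's stack loop; state = (stack, cnt); Python's stack[-3:] is drop (len-3)
def bStep (st : List Char × Nat) (ch : Char) : List Char × Nat :=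
  match st with
  | (stack, cnt) =>
    let stack := stack ++ [if ch = '1' then '1' else '0']
    if stack.drop (stack.length - 3) = ['1', '1', '0'] then
      (stack.take (stack.length - 3), cnt + 1)   -- del stack[-3:]; cnt += 1
    else (stack, cnt)

-- B's downward while-loop 'i = len(rem)-1; while i >= 0: if rem[i]=='0': break; i -= 1':
-- ported as a scan over the reversed list carrying the index i; exact step for step.
def rfind0 (l : List Char) (i : Int) : Int :=
  match l with
  | [] => -1
  | c :: t => if c = '0' then i else rfind0 t (i - 1)

def solution_alt (s : List String) : List String :=
  s.map (fun x =>
    match x.toList.foldl bStep ([], 0) with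
    | (rem, cnt) =>
      let i := rfind0 rem.reverse ((rem.length : Int) - 1)
      -- rem[:i+1] + '110'*cnt + rem[i+1:]; here -1 ≤ i < len rem, so the slices are take/drop
      String.mk (rem.take (i + 1).toNat
        ++ (List.replicate cnt (['1', '1', '0'] : List Char)).flatten
        ++ rem.drop (i + 1).toNat))

-- ===== PRECONDITION & SPEC =====
def Spec_solution (s : List String) (out : List String) : Prop := out = solution_alt s
instance (s : List String) (out : List String) : Decidable (Spec_solution s out) := by unfold Spec_solution; infer_instance

-- ===== CLAIM (what is proved, stated in full; the proofs are below) =====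
def Claim_equal_solution : Prop := ∀ (s : List String), Dom_solution s → Spec_solution s (solution s)

-- ===== LEMMAS AND PROOFS =====

-- "ones" is empty or ends with '0' (each flush of A appends a trailing '0')
def endsZero (l : List Char) : Prop := l = [] ∨ l.getLast? = some '0'

theorem suffix3_of_append (w : List Char) :
    ((w ++ ['1', '1', '0']).drop ((w ++ ['1', '1', '0']).length - 3)) = ['1', '1', '0'] := by
  have h : (w ++ ['1', '1', '0']).length - 3 = w.length := by simp
  rw [h, List.drop_left]

theorem take3_of_append (w : List Char) :
    ((w ++ ['1', '1', '0']).take ((w ++ ['1', '1', '0']).length - 3)) = w := by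
  have h : (w ++ ['1', '1', '0']).length - 3 = w.length := by simp
  rw [h, List.take_left]

-- if the last-three test fires, the stack's last char is '0'
theorem last_of_suffix3 (l : List Char)
    (h : l.drop (l.length - 3) = ['1', '1', '0']) : l.getLast? = some '0' := by
  have h2 : l = l.take (l.length - 3) ++ l.drop (l.length - 3) := (List.take_append_drop _ _).symm
  rw [h2, h, List.getLast?_append]
  simp

theorem no_pop_push_one (u : List Char) :
    ¬ ((u ++ ['1']).drop ((u ++ ['1']).length - 3) = ['1', '1', '0']) := by
  intro h
  have := last_of_suffix3 _ h
  rw [List.getLast?_append] at this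
  simp at this

theorem no_pop_zero (w : List Char) (hw : endsZero w) (k : Nat) (hk : k ≤ 1) :
    ¬ ((w ++ List.replicate k '1' ++ ['0']).drop
        ((w ++ List.replicate k '1' ++ ['0']).length - 3) = ['1', '1', '0']) := by
  intro h
  rcases hw with hw | hw
  · subst hw
    interval_cases k
    · simp at h
    · simp [List.replicate] at h
  · -- w ends with '0'
    rcases List.eq_nil_or_concat w with hv | ⟨v, c, hv⟩
    · rw [hv] at hw; simp at hw
    have hc : c = '0' := by
      rw [hv, List.concat_eq_append, List.getLast?_append] at hw
      simpa using hw
    rw [hv, List.concat_eq_append, hc] at h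
    interval_cases k
    · -- stack = v ++ ['0','0']
      have h2 : v ++ ['0'] ++ List.replicate 0 '1' ++ ['0'] = v ++ ['0', '0'] := by simp
      rw [h2] at h
      rcases List.eq_nil_or_concat v with hv2 | ⟨u, d, hv2⟩
      · rw [hv2] at h; simp at h
      · rw [hv2, List.concat_eq_append] at h
        have h3 : u ++ [d] ++ ['0', '0'] = u ++ [d, '0', '0'] := by simp
        rw [h3] at h
        have hl : (u ++ [d, '0', '0']).length - 3 = u.length := by simp
        rw [hl, List.drop_left] at h
        simp at h
    · -- stack = v ++ ['0','1','0']
      have h2 : v ++ ['0'] ++ List.replicate 1 '1' ++ ['0'] = v ++ ['0', '1', '0'] := by simp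
      rw [h2] at h
      have hl : (v ++ ['0', '1', '0']).length - 3 = v.length := by simp
      rw [hl, List.drop_left] at h
      simp at h

-- The loop invariant: B's stack is A's ones followed by the pending ones, counts agree.
theorem loop_rel (l : List Char) :
    ∀ (oc ooz : Nat) (ones : List Char), endsZero ones →
      l.foldl bStep (ones ++ List.replicate oc '1', ooz)
        = ((l.foldl aStep (oc, ooz, ones)).2.2
            ++ List.replicate (l.foldl aStep (oc, ooz, ones)).1 '1',
           (l.foldl aStep (oc, ooz, ones)).2.1)
      ∧ endsZero (l.foldl aStep (oc, ooz, ones)).2.2 := by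
  induction l with
  | nil => intro oc ooz ones h; exact ⟨rfl, h⟩
  | cons ch t ih =>
    intro oc ooz ones h
    by_cases h1 : ch = '1'
    · -- push '1', no pop
      have hc : (if ch = '1' then '1' else '0') = '1' := if_pos h1
      have hb : bStep (ones ++ List.replicate oc '1', ooz) ch
          = (ones ++ List.replicate (oc + 1) '1', ooz) := by
        simp only [bStep, hc]
        rw [if_neg (no_pop_push_one _)]
        simp [List.replicate_succ' (n := oc)]
      have ha : aStep (oc, ooz, ones) ch = (oc + 1, ooz, ones) := by
        simp [aStep, h1]
      simp only [List.foldl_cons, hb, ha]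
      exact ih (oc + 1) ooz ones h
    · by_cases h2 : 2 ≤ oc
      · -- convert a '110'
        have hsp : ones ++ List.replicate oc '1' ++ ['0']
            = (ones ++ List.replicate (oc - 2) '1') ++ ['1', '1', '0'] := by
          have : oc = (oc - 2) + 2 := by omega
          rw [this]
          simp [List.replicate_add]
        have hc : (if ch = '1' then '1' else '0') = '0' := if_neg h1
        have hb : bStep (ones ++ List.replicate oc '1', ooz) ch
            = (ones ++ List.replicate (oc - 2) '1', ooz + 1) := by
          simp only [bStep, hc]
          rw [hsp, if_pos (suffix3_of_append _), take3_of_append]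
        have ha : aStep (oc, ooz, ones) ch = (oc - 2, ooz + 1, ones) := by
          simp [aStep, h1, h2]
        simp only [List.foldl_cons, hb, ha]
        exact ih (oc - 2) (ooz + 1) ones h
      · -- flush
        have hk : oc ≤ 1 := by omega
        have hc : (if ch = '1' then '1' else '0') = '0' := if_neg h1
        have hb : bStep (ones ++ List.replicate oc '1', ooz) ch
            = (ones ++ List.replicate oc '1' ++ ['0'], ooz) := by
          simp only [bStep, hc]
          rw [if_neg (no_pop_zero ones h oc hk)]
        have ha : aStep (oc, ooz, ones) ch
            = (0, ooz, ones ++ List.replicate oc '1' ++ ['0']) := by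
          simp only [aStep, if_neg h1, if_neg h2]
          by_cases h0 : 0 < oc
          · simp [h0]
          · have : oc = 0 := by omega
            simp [this]
        simp only [List.foldl_cons, hb, ha]
        have h' : endsZero (ones ++ List.replicate oc '1' ++ ['0']) := by
          right; rw [List.getLast?_append]; simp
        have := ih 0 ooz (ones ++ List.replicate oc '1' ++ ['0']) h'
        simpa using this

-- range-fold of extend(['1','1','0']) is appending the flattened replicate
theorem range_fold_110 (n : Nat) (acc : List Char) :
    (List.range n).foldl (fun acc _ => acc ++ ['1', '1', '0']) acc
      = acc ++ (List.replicate n (['1', '1', '0'] : List Char)).flatten := by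
  induction n generalizing acc with
  | zero => simp
  | succ m ih =>
    rw [List.range_succ, List.foldl_append, ih]
    simp [List.replicate_succ']

-- rfind0 on a head '0' and on an all-'1' list
theorem rfind0_zero_head (r : List Char) (i : Int) : rfind0 ('0' :: r) i = i := by
  simp [rfind0]

-- rfind0 skips a block of '1's
theorem rfind0_skip (k : Nat) : ∀ (r : List Char) (i : Int),
    rfind0 (List.replicate k '1' ++ r) i = rfind0 r (i - k) := by
  induction k with
  | zero => intro r i; simp
  | succ m ih =>
    intro r i
    rw [List.replicate_succ]
    simp only [List.cons_append, rfind0]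
    rw [if_neg (by decide), ih]
    congr 1
    push_cast
    ring

theorem solution_spec : Claim_equal_solution := by
  unfold Claim_equal_solution Spec_solution
  intro s _
  unfold solution solution_alt
  apply List.map_congr_left
  intro x _
  have hmain := loop_rel x.toList 0 0 [] (Or.inl rfl)
  rcases hA : x.toList.foldl aStep (0, 0, []) with ⟨oc, ooz, ones⟩
  rw [hA] at hmain
  simp only at hmain
  obtain ⟨hB, hend⟩ := hmain
  simp only [List.nil_append, List.replicate_zero] at hB
  rw [hB]
  simp only
  -- A side: collapse the if and the range fold
  have hA3 : (if 0 < oc then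
        (List.range ooz).foldl (fun acc _ => acc ++ ['1', '1', '0']) ones ++ List.replicate oc '1'
      else (List.range ooz).foldl (fun acc _ => acc ++ ['1', '1', '0']) ones)
      = ones ++ (List.replicate ooz (['1', '1', '0'] : List Char)).flatten ++ List.replicate oc '1' := by
    rw [range_fold_110]
    by_cases h0 : 0 < oc
    · simp [h0]
    · have : oc = 0 := by omega
      simp [this]
  rw [hA3]
  -- B side: compute rfind0 and the splice
  rcases hend with hnil | hlast
  · subst hnil
    have hfind : rfind0 ((List.replicate oc '1' : List Char)).reverse
        (((List.replicate oc '1' : List Char).length : Int) - 1) = -1 := by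
      rw [List.reverse_replicate]
      have := rfind0_skip oc ([] : List Char) (((List.replicate oc '1' : List Char).length : Int) - 1)
      simp only [List.append_nil] at this
      rw [this]
      rfl
    simp only [List.nil_append, hfind]
    norm_num
  · -- ones ends with '0'
    rcases List.eq_nil_or_concat ones with hv | ⟨w, c, hv⟩
    · rw [hv] at hlast; simp at hlast
    have hc : c = '0' := by
      rw [hv, List.concat_eq_append, List.getLast?_append] at hlast
      simpa using hlast
    rw [hc] at hv
    rw [List.concat_eq_append] at hv
    have hrev : (ones ++ List.replicate oc '1').reverse
        = List.replicate oc '1' ++ ('0' :: w.reverse) := by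
      conv_lhs => rw [hv]
      simp
    rw [hrev, rfind0_skip, rfind0_zero_head]
    have hlen : ((ones ++ List.replicate oc '1').length : Int) - 1 - oc + 1
        = (ones.length : Int) := by
      simp only [List.length_append, List.length_replicate]
      push_cast
      ring
    rw [hlen]
    have htn : ((ones.length : Int)).toNat = ones.length := by simp
    rw [htn, List.take_left, List.drop_left]
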